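-- pv_equiv track=rewrite | github.com/mcdobr/yawaf-learn | compare_models.py | count_appearances
-- ===== SOURCE A (Python) =====
-- def count_appearances(words, needles):
--     appearances = dict()
--     for word in words:
--         lowered_word = word.lower()
--         if lowered_word in needles:
--             if lowered_word not in appearances:
--                 appearances[lowered_word] = 1
--             else:
--                 appearances[lowered_word] += 1
--     return appearances
-- ===== SOURCE B (Python) =====
-- def count_appearances(words, needles):
--     lowered = [w.lower() for w in words]
--     targets = set(needles)
--     seen = set()
--     keys = []
--     for lw in lowered:
--         if lw in targets and lw not in seen:
--             seen.add(lw)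
--             keys.append(lw)
--     return {k: lowered.count(k) for k in keys}
-- ===== Notes on version B (the rewrite author's own statement) =====
-- stated objective: alternative
-- what changed: B keeps no running counter dict: a first pass collects the distinct lowered needle-words in first-occurrence order (set-based membership and dedup), then each key's value is computed by a separate counting scan lowered.count(k), instead of A's single pass incrementing a dict entry per matching word.
import Mathlib
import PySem

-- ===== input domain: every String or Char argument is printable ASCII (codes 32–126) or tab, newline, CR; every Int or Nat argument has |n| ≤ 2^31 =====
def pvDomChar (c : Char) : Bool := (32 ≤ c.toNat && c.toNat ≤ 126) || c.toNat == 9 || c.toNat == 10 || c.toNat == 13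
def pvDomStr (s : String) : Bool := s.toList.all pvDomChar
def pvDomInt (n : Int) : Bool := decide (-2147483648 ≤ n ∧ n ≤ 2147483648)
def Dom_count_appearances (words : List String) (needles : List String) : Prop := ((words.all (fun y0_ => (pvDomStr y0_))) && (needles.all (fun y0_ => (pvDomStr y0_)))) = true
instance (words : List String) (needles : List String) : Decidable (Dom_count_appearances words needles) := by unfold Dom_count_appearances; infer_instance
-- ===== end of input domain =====

-- B keeps no running counter: a first pass collects the distinct lowered needle-words in first-occurrence order, then each value is a separate counting scan over the lowered words.


-- ===== PORT A =====
def count_appearances (words : List String) (needles : List String) : List (String × Int) :=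
  (words.foldl (fun (appearances : PySem.Dict String Int) word =>
      let lowered_word := PySem.Str.lower word
      if needles.contains lowered_word then
        if appearances.contains lowered_word = false then
          appearances.insert lowered_word 1
        else
          appearances.modify lowered_word 0 (· + 1)
      else appearances)
    PySem.Dict.empty).items

-- ===== PORT B =====
def count_appearances_alt (words : List String) (needles : List String) : List (String × Int) :=
  let lowered := words.map PySem.Str.lower
  let targets : PySem.Set String := PySem.Set.ofList needles
  let final := lowered.foldl
    (fun (s : PySem.Set String × List String) lw =>
      if targets.contains lw && !(PySem.Set.contains s.1 lw)
      then (PySem.Set.add s.1 lw, s.2 ++ [lw]) else s)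
    (PySem.Set.empty, [])
  final.2.map (fun k => (k, (PySem.List.count lowered k : Int)))

-- ===== PRECONDITION & SPEC =====
def Spec_count_appearances (words : List String) (needles : List String) (out : List (String × Int)) : Prop := out = count_appearances_alt words needles
instance (words : List String) (needles : List String) (out : List (String × Int)) : Decidable (Spec_count_appearances words needles out) := by unfold Spec_count_appearances; infer_instance

-- ===== CLAIM (what is proved, stated in full; the proofs are below) =====
def Claim_equal_count_appearances : Prop := ∀ (words : List String) (needles : List String), Dom_count_appearances words needles → Spec_count_appearances words needles (count_appearances words needles)

-- ===== LEMMAS AND PROOFS =====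

-- A's loop step and B's key-collection step, named for the proofs.
def pvStepA (needles : List String) (appearances : PySem.Dict String Int) (word : String) : PySem.Dict String Int :=
  let lowered_word := PySem.Str.lower word
  if needles.contains lowered_word then
    if appearances.contains lowered_word = false then
      appearances.insert lowered_word 1
    else
      appearances.modify lowered_word 0 (· + 1)
  else appearances

def pvKeys (needles : List String) (lowered : List String) : List String :=
  lowered.foldl (fun ks lw =>
      if needles.contains lw && !(ks.contains lw) then ks ++ [lw] else ks) []

-- lemma used by the invariant proof: appending one element leaves other counts unchanged
theorem pv_count_append_ne (L : List String) (a b : String) (h : a ≠ b) :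
    (L ++ [b]).count a = L.count a := by
  simp [List.count_append, Ne.symm h]

-- The loop invariant tying A's dict after a prefix to B's key list and counts.
theorem pv_invariant (needles : List String) (ws : List String) :
    (ws.foldl (pvStepA needles) PySem.Dict.empty).keys = pvKeys needles (ws.map PySem.Str.lower) ∧
    (∀ k ∈ pvKeys needles (ws.map PySem.Str.lower),
        (ws.foldl (pvStepA needles) PySem.Dict.empty).getD k 0 = ((ws.map PySem.Str.lower).count k : Int)) ∧
    (∀ k ∈ pvKeys needles (ws.map PySem.Str.lower), k ∈ needles) ∧
    (∀ k, k ∈ needles → (k ∈ pvKeys needles (ws.map PySem.Str.lower) ↔ k ∈ ws.map PySem.Str.lower)) ∧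
    (pvKeys needles (ws.map PySem.Str.lower)).Nodup := by
  induction ws using List.reverseRecOn with
  | nil => simp [pvKeys]
  | append_singleton ws w ih =>
    obtain ⟨hk, hv, hn, hm, hnd⟩ := ih
    have hKeysApp : pvKeys needles ((ws ++ [w]).map PySem.Str.lower) =
        if needles.contains (PySem.Str.lower w) && !((pvKeys needles (ws.map PySem.Str.lower)).contains (PySem.Str.lower w))
        then pvKeys needles (ws.map PySem.Str.lower) ++ [PySem.Str.lower w]
        else pvKeys needles (ws.map PySem.Str.lower) := by
      simp [pvKeys, List.foldl_append]
    have hFoldApp : (ws ++ [w]).foldl (pvStepA needles) PySem.Dict.empty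
        = pvStepA needles (ws.foldl (pvStepA needles) PySem.Dict.empty) w := by
      simp [List.foldl_append]
    have hLApp : (ws ++ [w]).map PySem.Str.lower = ws.map PySem.Str.lower ++ [PySem.Str.lower w] := by
      simp
    set lw := PySem.Str.lower w with hlw
    set K := pvKeys needles (ws.map PySem.Str.lower) with hK
    set d := ws.foldl (pvStepA needles) PySem.Dict.empty with hd
    have hcont : d.contains lw = K.contains lw := by
      rw [PySem.Dict.contains_eq_decide_mem_keys, hk, List.contains_eq_mem]
    rw [hFoldApp, hKeysApp]
    by_cases hc : lw ∈ needles
    · by_cases hin : lw ∈ K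
      · -- already-counted needle: A modifies in place, B's key list is unchanged
        have hKcB : K.contains lw = true := by simp [List.contains_eq_mem, hin]
        have hdc : d.contains lw = true := by rw [hcont]; exact hKcB
        have hstep : pvStepA needles d w = d.modify lw 0 (· + 1) := by
          simp [pvStepA, ← hlw, hcont, hc, hin]
        rw [hstep, if_neg (by simp [List.contains_eq_mem]; exact fun _ => hin)]
        refine ⟨?_, ?_, hn, ?_, hnd⟩
        · rw [PySem.Dict.keys_modify, PySem.Dict.keys_insert_of_contains d _ hdc, hk]
        · intro k hkK
          rw [PySem.Dict.getD_modify, hLApp]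
          by_cases hkl : k = lw
          · rw [if_pos hkl, hkl, hv lw hin, List.count_append]
            push_cast; simp
          · rw [if_neg hkl, hv k hkK, pv_count_append_ne _ _ _ hkl]
        · intro k hck
          rw [hm k hck, hLApp, List.mem_append, List.mem_singleton]
          constructor
          · exact fun h => Or.inl h
          · rintro (h1 | h1)
            · exact h1
            · rw [h1]; exact (hm lw hc).mp hin
      · -- new needle: A inserts with count 1, B appends the key
        have hKcB : K.contains lw = false := by simp [List.contains_eq_mem, hin]
        have hdc : d.contains lw = false := by rw [hcont]; exact hKcB
        have hstep : pvStepA needles d w = d.insert lw 1 := by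
          simp [pvStepA, ← hlw, hcont, hc, hin]
        have hnotL : lw ∉ ws.map PySem.Str.lower := fun h => hin ((hm lw hc).mpr h)
        rw [hstep, if_pos (by simp [List.contains_eq_mem]; exact ⟨hc, hin⟩)]
        refine ⟨?_, ?_, ?_, ?_, ?_⟩
        · rw [PySem.Dict.keys_insert_of_not_contains d _ hdc, hk]
        · intro k hkK
          rw [PySem.Dict.getD_insert, hLApp]
          rcases List.mem_append.mp hkK with hkold | hknew
          · have hkl : k ≠ lw := fun h => hin (h ▸ hkold)
            rw [if_neg hkl, hv k hkold, pv_count_append_ne _ _ _ hkl]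
          · have hkl : k = lw := by simpa using hknew
            rw [if_pos hkl, hkl, List.count_append,
              List.count_eq_zero.mpr hnotL]
            simp
        · intro k hkK
          rcases List.mem_append.mp hkK with hkold | hknew
          · exact hn k hkold
          · rw [show k = lw by simpa using hknew]; exact hc
        · intro k hck
          simp only [hLApp, List.mem_append, List.mem_singleton, hm k hck]
        · exact List.Nodup.append hnd (List.nodup_singleton lw)
            (fun a ha hb => hin ((List.mem_singleton.mp hb) ▸ ha))
    · -- not a needle: both sides ignore the word
      have hstep : pvStepA needles d w = d := by
        simp [pvStepA, ← hlw, hc]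
      rw [hstep, if_neg (by simp [List.contains_eq_mem]; exact fun h => absurd h hc)]
      refine ⟨hk, ?_, hn, ?_, hnd⟩
      · intro k hkK
        have hkl : k ≠ lw := fun h => hc (h ▸ hn k hkK)
        rw [hv k hkK, hLApp, pv_count_append_ne _ _ _ hkl]
      · intro k hck
        have hkl : k ≠ lw := fun h => hc (h ▸ hck)
        rw [hm k hck, hLApp, List.mem_append, List.mem_singleton]
        constructor
        · exact fun h => Or.inl h
        · rintro (h1 | h1)
          · exact h1
          · exact absurd h1 hkl

-- B's seen-set/keys pair fold: both components coincide and equal the plain key fold.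
theorem pv_pairfold (needles : List String) (L : List String) (ks : List String) :
    L.foldl (fun (s : PySem.Set String × List String) lw =>
      if (PySem.Set.ofList needles).contains lw && !(PySem.Set.contains s.1 lw)
      then (PySem.Set.add s.1 lw, s.2 ++ [lw]) else s) (ks, ks)
    = (L.foldl (fun ks lw => if needles.contains lw && !(ks.contains lw) then ks ++ [lw] else ks) ks,
       L.foldl (fun ks lw => if needles.contains lw && !(ks.contains lw) then ks ++ [lw] else ks) ks) := by
  induction L generalizing ks with
  | nil => rfl
  | cons lw L ih =>
    simp only [List.foldl_cons]
    have hcond : ((PySem.Set.ofList needles).contains lw && !(PySem.Set.contains ks lw))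
        = (needles.contains lw && !(ks.contains lw)) := by
      by_cases h : lw ∈ needles <;>
        simp [PySem.Set.contains, List.contains_eq_mem, PySem.Set.mem_ofList, h]
    rw [hcond]
    by_cases hb : (needles.contains lw && !(ks.contains lw)) = true
    · have hks : lw ∉ ks := by
        have h2 := ((Bool.and_eq_true _ _).mp hb).2
        simpa using h2
      have hadd : PySem.Set.add ks lw = ks ++ [lw] := by
        simp [PySem.Set.add, PySem.Set.contains, List.contains_eq_mem, hks]
      rw [if_pos hb, if_pos hb, hadd]
      exact ih (ks ++ [lw])
    · rw [if_neg hb, if_neg hb]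
      exact ih ks

-- ===== VERDICT (by name: the statement is the Claim_ definition above) =====
theorem count_appearances_spec : Claim_equal_count_appearances := by
  intro words needles _
  unfold Spec_count_appearances count_appearances count_appearances_alt
  obtain ⟨hk, hv, _, _, hnd⟩ := pv_invariant needles words
  show (words.foldl (pvStepA needles) PySem.Dict.empty).items
      = ((words.map PySem.Str.lower).foldl
          (fun (s : PySem.Set String × List String) lw =>
            if (PySem.Set.ofList needles).contains lw && !(PySem.Set.contains s.1 lw)
            then (PySem.Set.add s.1 lw, s.2 ++ [lw]) else s)
          (PySem.Set.empty, [])).2.map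
          (fun k => (k, (PySem.List.count (words.map PySem.Str.lower) k : Int)))
  rw [show (PySem.Set.empty : PySem.Set String) = ([] : List String) from rfl,
    pv_pairfold needles (words.map PySem.Str.lower) [],
    PySem.Dict.items_eq_map_keys _ (hk ▸ hnd) 0, hk]
  show (pvKeys needles (words.map PySem.Str.lower)).map _
      = (pvKeys needles (words.map PySem.Str.lower)).map _
  exact List.map_congr_left (fun k hkmem => by
    rw [hv k hkmem, PySem.List.count_eq])
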